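-- pv_equiv track=rewrite | github.com/sanchitsingh001/NarrativeWorlds | world_entity_layout_llm_v3.py | _candidate_indices_around
-- ===== SOURCE A (Python) =====
-- def _candidate_indices_around(idx0: int, tiles: int, radius: int = 12) -> list[int]:
--     tiles = int(tiles)
--     idx0 = max(0, min(tiles - 1, int(idx0)))
--     radius = max(1, int(radius))
--
--     out: list[int] = []
--     for d in range(0, radius + 1):
--         a = idx0 - d
--         b = idx0 + d
--         if 0 <= a <= tiles - 1:
--             out.append(a)
--         if d != 0 and 0 <= b <= tiles - 1:
--             out.append(b)
--
--     # dedup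
--     seen = set()
--     out2 = []
--     for v in out:
--         if v not in seen:
--             seen.add(v)
--             out2.append(v)
--     return out2
-- ===== SOURCE B (Python) =====
-- def _candidate_indices_around(idx0: int, tiles: int, radius: int = 12) -> list[int]:
--     tiles = int(tiles)
--     idx0 = max(0, min(tiles - 1, int(idx0)))
--     radius = max(1, int(radius))
--     lo = max(0, idx0 - radius)
--     hi = min(tiles - 1, idx0 + radius)
--     # single integer key linearising (distance, side): idx0 -> 0, idx0-d -> 2d-1, idx0+d -> 2d
--     return sorted(range(lo, hi + 1), key=lambda i: 2 * abs(i - idx0) - (i < idx0))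
-- ===== Notes on version B (the rewrite author's own statement) =====
-- stated objective: simpler
-- what changed: Replaces A's distance-by-distance loop with per-step boundary checks plus a set-based dedup pass by a single clamped range [lo, hi] sorted once with a key that linearises (distance from idx0, side), so there is no append loop and no dedup pass.
import Mathlib
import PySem

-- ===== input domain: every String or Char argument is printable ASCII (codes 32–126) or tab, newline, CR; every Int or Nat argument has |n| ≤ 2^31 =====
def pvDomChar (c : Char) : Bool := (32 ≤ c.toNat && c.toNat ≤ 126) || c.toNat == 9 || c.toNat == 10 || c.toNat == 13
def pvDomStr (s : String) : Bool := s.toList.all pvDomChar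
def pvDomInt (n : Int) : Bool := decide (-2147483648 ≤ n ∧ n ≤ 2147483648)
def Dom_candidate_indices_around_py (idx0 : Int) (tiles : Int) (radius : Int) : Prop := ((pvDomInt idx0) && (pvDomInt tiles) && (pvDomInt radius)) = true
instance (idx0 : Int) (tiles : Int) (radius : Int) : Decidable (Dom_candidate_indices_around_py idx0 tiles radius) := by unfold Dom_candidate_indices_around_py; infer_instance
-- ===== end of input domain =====

-- B replaces A's outward append loop + set-based dedup pass by one clamped range sorted with a
-- distance-linearising key (objective: simpler).

-- ===== PORT A =====
-- loop body of A's 'for d in range(0, radius + 1)'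
def pvStepA (tiles idx0 : Int) (out : List Int) (d : Int) : List Int :=
  let a := idx0 - d
  let b := idx0 + d
  let out := if 0 ≤ a ∧ a ≤ tiles - 1 then out ++ [a] else out
  if d ≠ 0 ∧ 0 ≤ b ∧ b ≤ tiles - 1 then out ++ [b] else out

-- loop body of A's dedup loop (state: seen set, out2 list)
def pvDedupStep (st : PySem.Set Int × List Int) (v : Int) : PySem.Set Int × List Int :=
  if PySem.Set.contains st.1 v then st else (PySem.Set.add st.1 v, st.2 ++ [v])

def candidate_indices_around_py (idx0 : Int) (tiles : Int) (radius : Int) : List Int :=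
  let idx0 := max 0 (min (tiles - 1) idx0)
  let radius := max 1 radius
  let out := (PySem.List.pyRange 0 (radius + 1) 1).foldl (pvStepA tiles idx0) []
  (out.foldl pvDedupStep ((PySem.Set.empty : PySem.Set Int), ([] : List Int))).2

-- ===== PORT B =====
def candidate_indices_around_py_alt (idx0 : Int) (tiles : Int) (radius : Int) : List Int :=
  let idx0 := max 0 (min (tiles - 1) idx0)
  let radius := max 1 radius
  let lo := max 0 (idx0 - radius)
  let hi := min (tiles - 1) (idx0 + radius)
  PySem.List.sorted (PySem.List.pyRange lo (hi + 1) 1)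
    (fun i => 2 * |i - idx0| - (if i < idx0 then 1 else 0)) false

-- ===== PRECONDITION & SPEC =====
def Spec_candidate_indices_around_py (idx0 : Int) (tiles : Int) (radius : Int) (out : List Int) : Prop := out = candidate_indices_around_py_alt idx0 tiles radius
instance (idx0 : Int) (tiles : Int) (radius : Int) (out : List Int) : Decidable (Spec_candidate_indices_around_py idx0 tiles radius out) := by unfold Spec_candidate_indices_around_py; infer_instance

-- ===== CLAIM (what is proved, stated in full; the proofs are below) =====
def Claim_equal_candidate_indices_around_py : Prop := ∀ (idx0 : Int) (tiles : Int) (radius : Int), Dom_candidate_indices_around_py idx0 tiles radius → Spec_candidate_indices_around_py idx0 tiles radius (candidate_indices_around_py idx0 tiles radius)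

-- ===== LEMMAS AND PROOFS =====

-- the list A's first loop has built after the distances 0..n
def pvL (t j : Int) : Nat → List Int
  | 0 => if 0 ≤ j ∧ j ≤ t - 1 then [j] else []
  | n + 1 => pvL t j n
      ++ ((if 0 ≤ j - (n + 1) ∧ j - (n + 1) ≤ t - 1 then [j - ((n : Int) + 1)] else [])
       ++ (if 0 ≤ j + (n + 1) ∧ j + (n + 1) ≤ t - 1 then [j + ((n : Int) + 1)] else []))

-- B's sort key
def pvK (j i : Int) : Int := 2 * |i - j| - (if i < j then 1 else 0)

lemma pvFoldA (t j : Int) : ∀ (n : Nat) (init : List Int),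
    (PySem.List.pyRange 0 ((n : Int) + 1) 1).foldl (pvStepA t j) init = init ++ pvL t j n := by
  intro n
  induction n with
  | zero =>
    intro init
    rw [show ((0 : Nat) : Int) + 1 = 0 + 1 by norm_num, PySem.List.pyRange_one_singleton]
    simp only [List.foldl_cons, List.foldl_nil, pvStepA, pvL]
    split_ifs with h1 h2 <;> simp_all
  | succ n ih =>
    intro init
    have hcast : ((n + 1 : Nat) : Int) + 1 = (((n : Int) + 1) + 1) := by push_cast; ring
    rw [hcast, PySem.List.pyRange_one_succ_right (by positivity), List.foldl_append, ih]
    simp only [List.foldl_cons, List.foldl_nil, pvStepA, pvL]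
    have hne : ((n : Int) + 1) ≠ 0 := by positivity
    split_ifs <;> simp_all

lemma pvMemL (t j : Int) :
    ∀ (n : Nat) (x : Int), x ∈ pvL t j n ↔ max 0 (j - n) ≤ x ∧ x ≤ min (t - 1) (j + n) := by
  intro n
  induction n with
  | zero =>
    intro x
    simp only [pvL]
    split_ifs <;> simp <;> omega
  | succ n ih =>
    intro x
    simp only [pvL, List.mem_append, ih]
    push_cast
    split_ifs <;> simp <;> omega

lemma pvPairwiseL (t j : Int) :
    ∀ (n : Nat), (pvL t j n).Pairwise (fun a b => pvK j a < pvK j b) := by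
  intro n
  induction n with
  | zero =>
    simp only [pvL]; split_ifs <;> simp
  | succ n ih =>
    have hb : ∀ x ∈ pvL t j n, pvK j x ≤ 2 * n := by
      intro x hx
      rw [pvMemL t j n x] at hx
      simp only [pvK]
      rcases abs_cases (x - j) with ⟨he, _⟩ | ⟨he, _⟩ <;> rw [he] <;> split_ifs <;> omega
    have hk1 : pvK j (j - ((n : Int) + 1)) = 2 * n + 1 := by
      simp only [pvK]
      rcases abs_cases (j - ((n : Int) + 1) - j) with ⟨he, _⟩ | ⟨he, _⟩ <;> rw [he] <;>
        split_ifs <;> omega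
    have hk2 : pvK j (j + ((n : Int) + 1)) = 2 * n + 2 := by
      simp only [pvK]
      rcases abs_cases (j + ((n : Int) + 1) - j) with ⟨he, _⟩ | ⟨he, _⟩ <;> rw [he] <;>
        split_ifs <;> omega
    simp only [pvL]
    apply List.pairwise_append.2
    refine ⟨ih, ?_, ?_⟩
    · split_ifs <;> simp [hk1, hk2]
    · intro a ha b hb'
      have := hb a ha
      have hbk : pvK j b = 2 * n + 1 ∨ pvK j b = 2 * n + 2 := by
        rcases List.mem_append.1 hb' with h | h
        · left
          have hb2 : b = j - ((n : Int) + 1) := by split_ifs at h <;> simp_all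
          rw [hb2, hk1]
        · right
          have hb2 : b = j + ((n : Int) + 1) := by split_ifs at h <;> simp_all
          rw [hb2, hk2]
      omega

lemma pvNodupL (t j : Int) (n : Nat) : (pvL t j n).Nodup := by
  refine (pvPairwiseL t j n).imp ?_
  intro a b hlt heq
  subst heq; exact lt_irrefl _ hlt

lemma pvDedupId : ∀ (xs : List Int) (s : PySem.Set Int) (o : List Int),
    xs.Nodup → (∀ v ∈ xs, v ∉ s) → (xs.foldl pvDedupStep (s, o)).2 = o ++ xs := by
  intro xs
  induction xs with
  | nil => intro s o _ _; simp
  | cons x t ih =>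
    intro s o hnd hns
    have hc : PySem.Set.contains s x = false := by
      simp [PySem.Set.contains]
      exact fun h => (hns x (by simp) h)
    simp only [List.foldl_cons, pvDedupStep, hc, Bool.false_eq_true, if_false]
    rw [ih (PySem.Set.add s x) (o ++ [x]) hnd.of_cons]
    · simp
    · intro v hv hmem
      rcases (PySem.Set.mem_add s x v).1 hmem with h | h
      · exact hns v (by simp [hv]) h
      · subst h; exact (List.nodup_cons.1 hnd).1 hv

-- ===== VERDICT (by name: the statement is the Claim_ definition above) =====
theorem candidate_indices_around_py_spec : Claim_equal_candidate_indices_around_py := by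
  intro idx0 tiles radius _
  unfold Spec_candidate_indices_around_py candidate_indices_around_py candidate_indices_around_py_alt
  dsimp only
  set j := max 0 (min (tiles - 1) idx0) with hj
  set r := max 1 radius with hr
  have hr1 : (1 : Int) ≤ r := le_max_left _ _
  obtain ⟨n, hn⟩ : ∃ n : Nat, r = (n : Int) := ⟨r.toNat, (Int.toNat_of_nonneg (by omega)).symm⟩
  -- A's first loop builds pvL, dedup on a Nodup list is the identity
  have hA : (PySem.List.pyRange 0 (r + 1) 1).foldl (pvStepA tiles j) [] = pvL tiles j n := by
    rw [hn]; exact pvFoldA tiles j n []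
  rw [hA, pvDedupId (pvL tiles j n) PySem.Set.empty [] (pvNodupL tiles j n)
        (by intro v _ hv; simp [PySem.Set.empty] at hv), List.nil_append]
  -- B's sort returns pvL: it is a strictly key-increasing rearrangement of the range
  refine (PySem.List.sorted_eq_of_perm_of_pairwise_lt _ _ _ ?_ ?_).symm
  · refine (List.perm_ext_iff_of_nodup (pvNodupL tiles j n) (PySem.List.nodup_pyRange_one _ _)).2 ?_
    intro x
    rw [pvMemL tiles j n x, PySem.List.mem_pyRange_one, hn]
    omega
  · exact pvPairwiseL tiles j n
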